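-- pv_equiv track=rewrite | github.com/lisardowo/S.T.A.R.S | DRL-router/formulas.py | GenerateConections
-- ===== SOURCE A (Python) =====
-- def GenerateConections(SourcePlane, SourceSatelite, strategy, NumberPlanes, NumberSatelites, h_hops, v_hops) -> list[str]:
--     enlaces = []
--     CurrentPlane, CurrentSatelite = SourcePlane, SourceSatelite
--
--     StepPlane = 1 if "E" in strategy else -1
--     StepSatelite = 1 if "N" in strategy else -1
--     # En lugar de comparar el ID del plano, usamos el número de saltos calculados
--     # Esto evita que el bucle "se pierda" si el destino está detrás del origen
--     for _ in range(h_hops):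
--         NextPlane = (CurrentPlane + StepPlane) % NumberPlanes
--         enlaces.append(f"S{CurrentPlane}_{CurrentSatelite}-S{NextPlane}_{CurrentSatelite}")
--         CurrentPlane = NextPlane
--
--     for _ in range(v_hops):
--         NextSatelite = (CurrentSatelite + StepSatelite) % NumberSatelites
--         enlaces.append(f"S{CurrentPlane}_{CurrentSatelite}-S{CurrentPlane}_{NextSatelite}")
--         CurrentSatelite = NextSatelite
--
--     return enlaces
-- ===== SOURCE B (Python) =====
-- def GenerateConections(SourcePlane, SourceSatelite, strategy, NumberPlanes, NumberSatelites, h_hops, v_hops) -> list[str]: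
--     sp = 1 if "E" in strategy else -1
--     ss = 1 if "N" in strategy else -1
--     hpath = [SourcePlane]
--     for _ in range(h_hops):
--         hpath.append((hpath[-1] + sp) % NumberPlanes)
--     vpath = [SourceSatelite]
--     for _ in range(v_hops):
--         vpath.append((vpath[-1] + ss) % NumberSatelites)
--     plane = hpath[-1]
--     horiz = [f"S{a}_{SourceSatelite}-S{b}_{SourceSatelite}" for a, b in zip(hpath, hpath[1:])]
--     vert = [f"S{plane}_{a}-S{plane}_{b}" for a, b in zip(vpath, vpath[1:])]
--     return horiz + vert
-- ===== Notes on version B (the rewrite author's own statement) =====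
-- stated objective: alternative
-- what changed: B first builds the lists of visited plane/satellite nodes and then derives each link string by pairing consecutive nodes (zip), instead of A's single stateful loop that emits a string per iteration while mutating the current position.
import Mathlib
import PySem

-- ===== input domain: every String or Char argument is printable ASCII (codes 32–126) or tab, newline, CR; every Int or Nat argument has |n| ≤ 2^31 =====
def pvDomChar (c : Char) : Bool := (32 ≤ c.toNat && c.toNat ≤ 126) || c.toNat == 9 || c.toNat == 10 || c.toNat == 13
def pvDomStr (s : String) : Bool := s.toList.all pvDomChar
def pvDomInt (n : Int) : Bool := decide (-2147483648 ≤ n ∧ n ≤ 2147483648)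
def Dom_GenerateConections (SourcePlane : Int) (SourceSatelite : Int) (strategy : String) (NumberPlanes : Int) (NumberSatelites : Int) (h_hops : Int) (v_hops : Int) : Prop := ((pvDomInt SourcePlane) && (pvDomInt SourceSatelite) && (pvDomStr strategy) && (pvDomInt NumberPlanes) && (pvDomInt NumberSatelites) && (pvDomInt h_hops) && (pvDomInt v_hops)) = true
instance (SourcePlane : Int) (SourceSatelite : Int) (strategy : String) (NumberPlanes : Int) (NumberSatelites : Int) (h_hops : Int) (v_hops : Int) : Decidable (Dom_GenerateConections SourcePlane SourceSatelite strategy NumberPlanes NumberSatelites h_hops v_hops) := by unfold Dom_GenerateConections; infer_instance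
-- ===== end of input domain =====

-- B rebuilds the same links by materialising the node path first and pairing consecutive nodes (alternative decomposition, same cost).

-- shared rendering of the f-string f"S{a}_{b}-S{c}_{d}"
def pvEdge (a b c d : Int) : String :=
  "S" ++ PySem.Int.toStr a ++ "_" ++ PySem.Int.toStr b ++ "-S" ++ PySem.Int.toStr c ++ "_" ++ PySem.Int.toStr d

-- ===== PORT A =====
def GenerateConections (SourcePlane : Int) (SourceSatelite : Int) (strategy : String) (NumberPlanes : Int) (NumberSatelites : Int) (h_hops : Int) (v_hops : Int) : List String :=
  let StepPlane : Int := if PySem.Str.isIn "E" strategy then 1 else -1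
  let StepSatelite : Int := if PySem.Str.isIn "N" strategy then 1 else -1
  let hres := (PySem.List.pyRange 0 h_hops 1).foldl
    (fun (st : List String × Int) _ =>
      let NextPlane := PySem.Int.mod (st.2 + StepPlane) NumberPlanes
      (st.1 ++ [pvEdge st.2 SourceSatelite NextPlane SourceSatelite], NextPlane))
    ([], SourcePlane)
  let vres := (PySem.List.pyRange 0 v_hops 1).foldl
    (fun (st : List String × Int) _ =>
      let NextSatelite := PySem.Int.mod (st.2 + StepSatelite) NumberSatelites
      (st.1 ++ [pvEdge hres.2 st.2 hres.2 NextSatelite], NextSatelite))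
    (hres.1, SourceSatelite)
  vres.1

-- ===== PORT B =====
-- Source B's path-building loop: append (last + step) % m, hops times (hpath[-1] via pyGetD; the list is never empty)
def pvPath (start step m hops : Int) : List Int :=
  (PySem.List.pyRange 0 hops 1).foldl
    (fun acc _ => acc ++ [PySem.Int.mod (PySem.List.pyGetD acc (-1) 0 + step) m]) [start]

def GenerateConections_alt (SourcePlane : Int) (SourceSatelite : Int) (strategy : String) (NumberPlanes : Int) (NumberSatelites : Int) (h_hops : Int) (v_hops : Int) : List String :=
  let sp : Int := if PySem.Str.isIn "E" strategy then 1 else -1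
  let ss : Int := if PySem.Str.isIn "N" strategy then 1 else -1
  let hpath := pvPath SourcePlane sp NumberPlanes h_hops
  let vpath := pvPath SourceSatelite ss NumberSatelites v_hops
  let plane := PySem.List.pyGetD hpath (-1) 0
  let horiz := (hpath.zip (PySem.List.slice hpath (some 1) none)).map
    (fun p => pvEdge p.1 SourceSatelite p.2 SourceSatelite)
  let vert := (vpath.zip (PySem.List.slice vpath (some 1) none)).map
    (fun p => pvEdge plane p.1 plane p.2)
  horiz ++ vert

-- ===== PRECONDITION & SPEC =====
-- Pre_ excludes exactly the inputs where Python raises ZeroDivisionError (a '%' by zero), in both A and B: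
-- a positive number of horizontal (resp. vertical) hops with NumberPlanes = 0 (resp. NumberSatelites = 0).
def Pre_GenerateConections (SourcePlane : Int) (SourceSatelite : Int) (strategy : String) (NumberPlanes : Int) (NumberSatelites : Int) (h_hops : Int) (v_hops : Int) : Prop :=
  (0 < h_hops → NumberPlanes ≠ 0) ∧ (0 < v_hops → NumberSatelites ≠ 0)
instance (SourcePlane : Int) (SourceSatelite : Int) (strategy : String) (NumberPlanes : Int) (NumberSatelites : Int) (h_hops : Int) (v_hops : Int) : Decidable (Pre_GenerateConections SourcePlane SourceSatelite strategy NumberPlanes NumberSatelites h_hops v_hops) := by unfold Pre_GenerateConections; infer_instance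

def pvWitness_GenerateConections : Int × Int × String × Int × Int × Int × Int := (0, 0, "EN", 3, 4, 2, 2)

def Spec_GenerateConections (SourcePlane : Int) (SourceSatelite : Int) (strategy : String) (NumberPlanes : Int) (NumberSatelites : Int) (h_hops : Int) (v_hops : Int) (out : List String) : Prop := out = GenerateConections_alt SourcePlane SourceSatelite strategy NumberPlanes NumberSatelites h_hops v_hops
instance (SourcePlane : Int) (SourceSatelite : Int) (strategy : String) (NumberPlanes : Int) (NumberSatelites : Int) (h_hops : Int) (v_hops : Int) (out : List String) : Decidable (Spec_GenerateConections SourcePlane SourceSatelite strategy NumberPlanes NumberSatelites h_hops v_hops out) := by unfold Spec_GenerateConections; infer_instance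

-- ===== CLAIM (what is proved, stated in full; the proofs are below) =====
def Claim_equal_GenerateConections : Prop := ∀ (SourcePlane : Int) (SourceSatelite : Int) (strategy : String) (NumberPlanes : Int) (NumberSatelites : Int) (h_hops : Int) (v_hops : Int), Dom_GenerateConections SourcePlane SourceSatelite strategy NumberPlanes NumberSatelites h_hops v_hops → Pre_GenerateConections SourcePlane SourceSatelite strategy NumberPlanes NumberSatelites h_hops v_hops → Spec_GenerateConections SourcePlane SourceSatelite strategy NumberPlanes NumberSatelites h_hops v_hops (GenerateConections SourcePlane SourceSatelite strategy NumberPlanes NumberSatelites h_hops v_hops)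

-- ===== LEMMAS AND PROOFS =====

-- proof-side abstractions: the node chain produced by iterating g, its last node, and consecutive-pair edges
def pvChainG (g : Int → Int) (p : Int) : Nat → List Int
  | 0 => [p]
  | n+1 => p :: pvChainG g (g p) n

def pvLastG (g : Int → Int) (p : Int) : Nat → Int
  | 0 => p
  | n+1 => pvLastG g (g p) n

def pvEdgesF (f : Int → Int → String) : List Int → List String
  | a :: b :: r => f a b :: pvEdgesF f (b :: r)
  | _ => []

theorem pvChainG_ne_nil (g : Int → Int) (p : Int) (n : Nat) : pvChainG g p n ≠ [] := by
  cases n <;> simp [pvChainG]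

theorem pvEdgesF_cons_chain (f : Int → Int → String) (g : Int → Int) (p q : Int) (n : Nat) :
    pvEdgesF f (p :: pvChainG g q n) = f p q :: pvEdgesF f (pvChainG g q n) := by
  cases n <;> simp [pvChainG, pvEdgesF]

-- A's loop shape: state = (accumulated strings, current node)
theorem foldA_eq (g : Int → Int) (f : Int → Int → String) (l : List Int) :
    ∀ (es : List String) (p : Int),
      l.foldl (fun (st : List String × Int) _ => (st.1 ++ [f st.2 (g st.2)], g st.2)) (es, p)
      = (es ++ pvEdgesF f (pvChainG g p l.length), pvLastG g p l.length) := by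
  induction l with
  | nil => intro es p; simp [pvChainG, pvLastG, pvEdgesF]
  | cons a t ih =>
    intro es p
    simp only [List.foldl_cons, List.length_cons, ih, pvChainG, pvLastG, pvEdgesF_cons_chain]
    simp

-- B's path loop shape
theorem foldB_eq (g : Int → Int) (l : List Int) :
    ∀ (pre : List Int) (p : Int),
      l.foldl (fun acc _ => acc ++ [g (PySem.List.pyGetD acc (-1) 0)]) (pre ++ [p])
      = pre ++ pvChainG g p l.length := by
  induction l with
  | nil => intro pre p; simp [pvChainG]
  | cons a t ih =>
    intro pre p
    simp only [List.foldl_cons, PySem.List.pyGetD_neg_one_append_singleton, List.length_cons]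
    have : pre ++ [p] ++ [g p] = (pre ++ [p]) ++ [g p] := by simp
    rw [this, ih (pre ++ [p]) (g p)]
    simp [pvChainG]

theorem pvPath_eq (start step m hops : Int) :
    pvPath start step m hops
      = pvChainG (fun x => PySem.Int.mod (x + step) m) start (PySem.List.pyRange 0 hops 1).length := by
  have := foldB_eq (fun x => PySem.Int.mod (x + step) m) (PySem.List.pyRange 0 hops 1) [] start
  simpa [pvPath] using this

theorem zip_tail_eq_pvEdgesF (f : Int → Int → String) (xs : List Int) :
    (xs.zip xs.tail).map (fun p => f p.1 p.2) = pvEdgesF f xs := by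
  induction xs with
  | nil => simp [pvEdgesF]
  | cons a t ih =>
    cases t with
    | nil => simp [pvEdgesF]
    | cons b r =>
      simp only [List.tail_cons, List.zip_cons_cons, List.map_cons, pvEdgesF]
      rw [← ih]
      simp

theorem pyGetD_chain_last (g : Int → Int) (p : Int) (n : Nat) :
    PySem.List.pyGetD (pvChainG g p n) (-1) 0 = pvLastG g p n := by
  induction n generalizing p with
  | zero =>
    have h := PySem.List.pyGetD_neg_one_append_singleton ([] : List Int) p 0
    simpa [pvChainG, pvLastG] using h
  | succ n ih =>
    rw [PySem.List.pyGetD_neg_one (pvChainG g p (n+1)) 0 (pvChainG_ne_nil g p (n+1))]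
    simp only [pvChainG, pvLastG]
    rw [List.getLast_cons (pvChainG_ne_nil g (g p) n),
        ← PySem.List.pyGetD_neg_one (pvChainG g (g p) n) 0 (pvChainG_ne_nil g (g p) n)]
    exact ih (g p)

-- ===== VERDICT (by name: the statement is the Claim_ definition above) =====
theorem GenerateConections_spec : Claim_equal_GenerateConections := by
  unfold Claim_equal_GenerateConections
  intro SP SS strat NP NS hh vv _ _
  unfold Spec_GenerateConections GenerateConections GenerateConections_alt
  simp only [PySem.List.slice_from_one]
  set sp : Int := if PySem.Str.isIn "E" strat then 1 else -1 with hsp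
  set ss : Int := if PySem.Str.isIn "N" strat then 1 else -1 with hss
  set gH : Int → Int := fun x => PySem.Int.mod (x + sp) NP with hgH
  set gV : Int → Int := fun x => PySem.Int.mod (x + ss) NS with hgV
  set nH := (PySem.List.pyRange 0 hh 1).length with hnH
  set nV := (PySem.List.pyRange 0 vv 1).length with hnV
  have hA1 : (PySem.List.pyRange 0 hh 1).foldl
      (fun (st : List String × Int) _ =>
        (st.1 ++ [pvEdge st.2 SS (PySem.Int.mod (st.2 + sp) NP) SS], PySem.Int.mod (st.2 + sp) NP))
      ([], SP)
      = ([] ++ pvEdgesF (fun a b => pvEdge a SS b SS) (pvChainG gH SP nH), pvLastG gH SP nH) :=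
    foldA_eq gH (fun a b => pvEdge a SS b SS) (PySem.List.pyRange 0 hh 1) [] SP
  rw [hA1]
  set P := pvLastG gH SP nH with hP
  have hA2 : (PySem.List.pyRange 0 vv 1).foldl
      (fun (st : List String × Int) _ =>
        (st.1 ++ [pvEdge P st.2 P (PySem.Int.mod (st.2 + ss) NS)], PySem.Int.mod (st.2 + ss) NS))
      ([] ++ pvEdgesF (fun a b => pvEdge a SS b SS) (pvChainG gH SP nH), SS)
      = ([] ++ pvEdgesF (fun a b => pvEdge a SS b SS) (pvChainG gH SP nH)
          ++ pvEdgesF (fun a b => pvEdge P a P b) (pvChainG gV SS nV), pvLastG gV SS nV) :=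
    foldA_eq gV (fun a b => pvEdge P a P b) (PySem.List.pyRange 0 vv 1) _ SS
  rw [hA2]
  rw [pvPath_eq SP sp NP hh, pvPath_eq SS ss NS vv, ← hgH, ← hgV, ← hnH, ← hnV]
  rw [pyGetD_chain_last gH SP nH, ← hP]
  rw [zip_tail_eq_pvEdgesF (fun a b => pvEdge a SS b SS) (pvChainG gH SP nH)]
  rw [zip_tail_eq_pvEdgesF (fun a b => pvEdge P a P b) (pvChainG gV SS nV)]
  simp
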